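-- pv_equiv track=rewrite | github.com/Anson008/Python_Algorithm_Excercises | hash_table/two_difference.py | two_difference_sorted2
-- ===== SOURCE A (Python) =====
-- def two_difference_sorted2(array, target):
--     """
--     input: int[] array, int target
--     return: int[]
--     """
--     # write your solution here
--     n = len(array) - 1
--     i, j = 0, 1
--     target_abs = abs(target)
--     while j <= n:
--         if array[j] - array[i] < target_abs:
--             j += 1
--         elif array[j] - array[i] > target_abs:
--             i += 1
--             if i == j:
--                 j += 1
--         else:
--             if target >= 0:
--                 return [i, j]
--             else:
--                 return [j, i]
--     return []
-- ===== SOURCE B (Python) =====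
-- def two_difference_sorted2(array, target):
--     t = abs(target)
--     seen = {}
--     for k, x in enumerate(array):
--         c = x - t
--         if c in seen:
--             return [seen[c], k] if target >= 0 else [k, seen[c]]
--         if x not in seen:
--             seen[x] = k
--     return []
-- ===== Notes on version B (the rewrite author's own statement) =====
-- stated objective: alternative
-- what changed: Replaces A's two-pointer sweep over the sorted array by a single forward hash-map pass: a dict mapping each value to its first index, checking for the complement value before inserting; Pre_ admits sorted arrays (the function's documented domain) plus arrays with no index pair at the difference (both return []), and excludes unsorted arrays containing such a pair, where A's two-pointer answer is an artefact of the sweep order and the hash pass legitimately finds pairs the sweep misses.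
-- outside the precondition, e.g. on two_difference_sorted2([0, 3, 1], 1): A returns [], B returns [0, 2]
import Mathlib
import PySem

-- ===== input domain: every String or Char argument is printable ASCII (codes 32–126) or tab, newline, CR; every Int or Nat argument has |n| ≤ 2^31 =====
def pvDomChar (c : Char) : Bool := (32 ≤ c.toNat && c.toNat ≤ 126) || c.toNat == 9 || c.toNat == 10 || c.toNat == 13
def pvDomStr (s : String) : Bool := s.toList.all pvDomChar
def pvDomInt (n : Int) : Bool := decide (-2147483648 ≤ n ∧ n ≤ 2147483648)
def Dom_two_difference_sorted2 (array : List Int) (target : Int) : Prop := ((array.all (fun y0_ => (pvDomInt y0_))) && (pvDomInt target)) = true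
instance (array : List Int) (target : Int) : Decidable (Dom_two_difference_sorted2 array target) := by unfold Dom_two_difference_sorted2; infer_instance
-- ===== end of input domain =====

-- B replaces A's two-pointer sweep by a single forward hash-map pass (value -> first index,
-- complement looked up before inserting); equality is claimed on nondecreasing arrays, the
-- documented domain of this 'sorted' function.

-- ===== PORT A =====
-- A's while loop; `fuel` is only a totality guard (the loop makes at most 2·len steps,
-- the initial fuel 2·len+2 is never exhausted).  Indices i < j ≤ len-1 are always in
-- range and nonnegative, so `List.getD` is exact for Python's `array[·]` here.
def twoDiffLoopA (a : List Int) (target tabs : Int) : Nat → Nat → Nat → List Int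
  | 0, _, _ => []
  | fuel+1, i, j =>
    if (j : Int) ≤ (a.length : Int) - 1 then
      if a.getD j 0 - a.getD i 0 < tabs then
        twoDiffLoopA a target tabs fuel i (j+1)
      else if a.getD j 0 - a.getD i 0 > tabs then
        if i + 1 = j then twoDiffLoopA a target tabs fuel (i+1) (j+1)
        else twoDiffLoopA a target tabs fuel (i+1) j
      else
        if target ≥ 0 then [(i : Int), (j : Int)] else [(j : Int), (i : Int)]
    else []

def two_difference_sorted2 (array : List Int) (target : Int) : List Int :=
  twoDiffLoopA array target |target| (2 * array.length + 2) 0 1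

-- ===== PORT B =====
-- Source B's `for k, x in enumerate(array)` ported as an index recursion (x = array[k], in
-- range, so `getD` is exact); `seen` is the Python dict value -> first index.
def twoDiffLoopB (a : List Int) (target t : Int) (k : Nat) (seen : PySem.Dict Int Int) : List Int :=
  if _h : k < a.length then
    let x := a.getD k 0
    match seen.get? (x - t) with
    | some i => if target ≥ 0 then [i, (k : Int)] else [(k : Int), i]
    | none =>
      twoDiffLoopB a target t (k+1) (if seen.contains x then seen else seen.insert x (k : Int))
  else []
termination_by a.length - k

def two_difference_sorted2_alt (array : List Int) (target : Int) : List Int :=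
  twoDiffLoopB array target |target| 0 PySem.Dict.empty

-- ===== PRECONDITION & SPEC =====
-- Pre_ admits sorted arrays (the function's documented domain) and, in addition, any array
-- with no index pair at the required difference (both programs trivially return [] there);
-- it excludes unsorted arrays containing such a pair, on which A still returns but its
-- two-pointer answer is an artefact of the sweep order.
def Pre_two_difference_sorted2 (array : List Int) (target : Int) : Prop :=
  List.Pairwise (· ≤ ·) array ∨
    ∀ j < array.length, ∀ i < j, array.getD i 0 ≠ array.getD j 0 - |target|
instance (array : List Int) (target : Int) : Decidable (Pre_two_difference_sorted2 array target) := by unfold Pre_two_difference_sorted2; infer_instance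

def pvWitness_two_difference_sorted2 : List Int × Int := ([1, 3, 4], 2)

def Spec_two_difference_sorted2 (array : List Int) (target : Int) (out : List Int) : Prop := out = two_difference_sorted2_alt array target
instance (array : List Int) (target : Int) (out : List Int) : Decidable (Spec_two_difference_sorted2 array target out) := by unfold Spec_two_difference_sorted2; infer_instance

-- ===== CLAIM (what is proved, stated in full; the proofs are below) =====
def Claim_equal_two_difference_sorted2 : Prop := ∀ (array : List Int) (target : Int), Dom_two_difference_sorted2 array target → Pre_two_difference_sorted2 array target → Spec_two_difference_sorted2 array target (two_difference_sorted2 array target)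

-- ===== LEMMAS AND PROOFS =====

-- The common characterisation of the result: either no pair exists and the output is [],
-- or (i, j) is the pair with the least second index j and, for that j, the least first
-- index i with a[i] = a[j] - t.
def TDRes (a : List Int) (tg t : Int) (out : List Int) : Prop :=
  (out = [] ∧ ∀ j < a.length, ∀ i < j, a.getD i 0 ≠ a.getD j 0 - t)
  ∨ ∃ i j : Nat, i < j ∧ j < a.length ∧ a.getD i 0 = a.getD j 0 - t
      ∧ (∀ j' < j, ∀ i' < j', a.getD i' 0 ≠ a.getD j' 0 - t)
      ∧ (∀ i' < i, a.getD i' 0 ≠ a.getD j 0 - t)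
      ∧ out = (if tg ≥ 0 then [(i : Int), (j : Int)] else [(j : Int), (i : Int)])

lemma TDRes_unique (a : List Int) (tg t : Int) (o1 o2 : List Int)
    (h1 : TDRes a tg t o1) (h2 : TDRes a tg t o2) : o1 = o2 := by
  rcases h1 with ⟨e1, n1⟩ | ⟨i1, j1, hij1, hjl1, heq1, hmin1, himin1, ho1⟩ <;>
    rcases h2 with ⟨e2, n2⟩ | ⟨i2, j2, hij2, hjl2, heq2, hmin2, himin2, ho2⟩
  · rw [e1, e2]
  · exact absurd heq2 (n1 j2 hjl2 i2 hij2)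
  · exact absurd heq1 (n2 j1 hjl1 i1 hij1)
  · have hj : j1 = j2 := by
      rcases Nat.lt_trichotomy j1 j2 with h | h | h
      · exact absurd heq1 (hmin2 j1 h i1 hij1)
      · exact h
      · exact absurd heq2 (hmin1 j2 h i2 hij2)
    subst hj
    have hi : i1 = i2 := by
      rcases Nat.lt_trichotomy i1 i2 with h | h | h
      · exact absurd heq1 (himin2 i1 h)
      · exact h
      · exact absurd heq2 (himin1 i2 h)
    subst hi
    rw [ho1, ho2]

-- A's loop satisfies TDRes (uses sortedness).
lemma twoDiffLoopA_res (a : List Int) (tg t : Int)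
    (mono : ∀ i j : Nat, i ≤ j → j < a.length → a.getD i 0 ≤ a.getD j 0) :
    ∀ (fuel i j : Nat), i < j → 2 * a.length + 1 ≤ fuel + i + j →
      (∀ j' < j, ∀ i' < j', a.getD i' 0 ≠ a.getD j' 0 - t) →
      (j < a.length → ∀ i' < i, a.getD i' 0 < a.getD j 0 - t) →
      TDRes a tg t (twoDiffLoopA a tg t fuel i j) := by
  intro fuel
  induction fuel with
  | zero =>
    intro i j hij hb h2 _h3
    left
    refine ⟨rfl, fun j' hj' i' hi' => h2 j' (by omega) i' hi'⟩
  | succ fuel ih =>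
    intro i j hij hb h2 h3
    rw [twoDiffLoopA]
    by_cases hj : (j : Int) ≤ (a.length : Int) - 1
    · have hjl : j < a.length := by omega
      rw [if_pos hj]
      rcases lt_trichotomy (a.getD j 0 - a.getD i 0) t with hd | hd | hd
      · -- diff < t : j += 1
        rw [if_pos hd]
        have h2' : ∀ j' < j + 1, ∀ i' < j', a.getD i' 0 ≠ a.getD j' 0 - t := by
          intro j' hj' i' hi'
          rcases Nat.lt_or_ge j' j with h | h
          · exact h2 j' h i' hi'
          · have hj'' : j' = j := by omega
            subst hj''
            rcases Nat.lt_or_ge i' i with h' | h'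
            · exact ne_of_lt (h3 hjl i' h')
            · have : a.getD i 0 ≤ a.getD i' 0 := mono i i' h' (by omega)
              omega
        refine ih i (j+1) (by omega) (by omega) h2' ?_
        intro hjl' i' hi'
        have : a.getD j 0 ≤ a.getD (j+1) 0 := mono j (j+1) (by omega) hjl'
        have := h3 hjl i' hi'
        omega
      · -- match
        rw [if_neg (by omega : ¬ a.getD j 0 - a.getD i 0 < t),
            if_neg (by omega : ¬ a.getD j 0 - a.getD i 0 > t)]
        right
        exact ⟨i, j, hij, hjl, by omega, h2,
          fun i' hi' => ne_of_lt (h3 hjl i' hi'), rfl⟩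
      · -- diff > t : i += 1 (maybe also j)
        rw [if_neg (by omega : ¬ a.getD j 0 - a.getD i 0 < t), if_pos hd]
        by_cases hcol : i + 1 = j
        · rw [if_pos hcol]
          have h2' : ∀ j' < j + 1, ∀ i' < j', a.getD i' 0 ≠ a.getD j' 0 - t := by
            intro j' hj' i' hi'
            rcases Nat.lt_or_ge j' j with h | h
            · exact h2 j' h i' hi'
            · have hj'' : j' = j := by omega
              subst hj''
              rcases Nat.lt_or_ge i' i with h' | h'
              · exact ne_of_lt (h3 hjl i' h')
              · have hi'' : i' = i := by omega
                subst hi''; omega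
          refine ih (i+1) (j+1) (by omega) (by omega) h2' ?_
          intro hjl' i' hi'
          have hmono : a.getD j 0 ≤ a.getD (j+1) 0 := mono j (j+1) (by omega) hjl'
          rcases Nat.lt_or_ge i' i with h' | h'
          · have := h3 hjl i' h'; omega
          · have hi'' : i' = i := by omega
            subst hi''; omega
        · rw [if_neg hcol]
          refine ih (i+1) j (by omega) (by omega) h2 ?_
          intro hjl' i' hi'
          rcases Nat.lt_or_ge i' i with h' | h'
          · exact h3 hjl' i' h'
          · have hi'' : i' = i := by omega
            subst hi''; omega
    · have hjl : ¬ j < a.length := by omega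
      rw [if_neg hj]
      left
      exact ⟨rfl, fun j' hj' i' hi' => h2 j' (by omega) i' hi'⟩

-- Invariant of B's dict: `seen` maps a value to its first index among a[0..k-1].
def InvD (a : List Int) (k : Nat) (seen : PySem.Dict Int Int) : Prop :=
  ∀ v i, seen.get? v = some i ↔
    ∃ m : Nat, i = (m : Int) ∧ m < k ∧ a.getD m 0 = v ∧ ∀ m' < m, a.getD m' 0 ≠ v

lemma InvD_none (a : List Int) (k : Nat) (seen : PySem.Dict Int Int)
    (hinv : InvD a k seen) (v : Int) (hn : seen.get? v = none) :
    ∀ m < k, a.getD m 0 ≠ v := by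
  intro m hm hv
  have hex : ∃ m, m < k ∧ a.getD m 0 = v := ⟨m, hm, hv⟩
  let m0 := Nat.find hex
  have hm0 := Nat.find_spec hex
  have hfirst : ∀ m' < m0, a.getD m' 0 ≠ v := by
    intro m' hm' hv'
    exact Nat.find_min hex hm' ⟨by omega, hv'⟩
  have : seen.get? v = some (m0 : Int) :=
    (hinv v (m0 : Int)).mpr ⟨m0, rfl, hm0.1, hm0.2, hfirst⟩
  rw [hn] at this
  cases this

lemma twoDiffLoopB_res (a : List Int) (tg t : Int) :
    ∀ (k : Nat) (seen : PySem.Dict Int Int), k ≤ a.length → InvD a k seen →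
      (∀ j' < k, ∀ i' < j', a.getD i' 0 ≠ a.getD j' 0 - t) →
      TDRes a tg t (twoDiffLoopB a tg t k seen) := by
  intro k seen hk hinv h2
  rw [twoDiffLoopB]
  split
  case isFalse hlt =>
    left
    exact ⟨rfl, fun j' hj' i' hi' => h2 j' (by omega) i' hi'⟩
  case isTrue hlt =>
    set x := a.getD k 0 with hx
    rcases hg : seen.get? (x - t) with _ | i
    · -- complement not seen: recurse with updated dict
      simp only [hg]
      have hnone := InvD_none a k seen hinv (x - t) hg
      have h2' : ∀ j' < k + 1, ∀ i' < j', a.getD i' 0 ≠ a.getD j' 0 - t := by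
        intro j' hj' i' hi'
        rcases Nat.lt_or_ge j' k with h | h
        · exact h2 j' h i' hi'
        · have : j' = k := by omega
          subst this
          exact hnone i' hi'
      have hinv' : InvD a (k+1)
          (if seen.contains x then seen else seen.insert x (k : Int)) := by
        by_cases hc : seen.contains x = true
        · rw [if_pos hc]
          intro v i
          constructor
          · intro h
            rcases (hinv v i).mp h with ⟨m, him, hm, hv, hf⟩
            exact ⟨m, him, by omega, hv, hf⟩
          · rintro ⟨m, him, hm, hv, hf⟩
            rcases Nat.lt_or_ge m k with h | h
            · exact (hinv v i).mpr ⟨m, him, h, hv, hf⟩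
            · have hmk : m = k := by omega
              subst hmk
              -- v = a[k] = x, but x already in seen: contradiction with first-ness
              rw [PySem.Dict.contains_eq_isSome_get?] at hc
              rcases Option.isSome_iff_exists.mp hc with ⟨i0, hi0⟩
              rcases (hinv x i0).mp hi0 with ⟨m0, _, hm0, hv0, _⟩
              have hxv : x = v := by rw [hx, hv]
              rw [hxv] at hv0
              exact absurd hv0 (hf m0 hm0)
        · rw [if_neg hc]
          have hxn : seen.get? x = none := by
            rw [PySem.Dict.get?_eq_none_iff_contains]
            exact eq_false_of_ne_true hc
          have hxfirst := InvD_none a k seen hinv x hxn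
          intro v i
          rw [PySem.Dict.get?_insert]
          by_cases hv : v = x
          · rw [if_pos hv]
            subst hv
            constructor
            · intro h
              refine ⟨k, by exact (Option.some_inj.mp h).symm, by omega, rfl, hxfirst⟩
            · rintro ⟨m, him, hm, hv, hf⟩
              rcases Nat.lt_or_ge m k with h | h
              · exact absurd hv (hxfirst m h)
              · have : m = k := by omega
                subst this; rw [him]
          · rw [if_neg hv]
            constructor
            · intro h
              rcases (hinv v i).mp h with ⟨m, him, hm, hvv, hf⟩
              exact ⟨m, him, by omega, hvv, hf⟩
            · rintro ⟨m, him, hm, hvv, hf⟩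
              rcases Nat.lt_or_ge m k with h | h
              · exact (hinv v i).mpr ⟨m, him, h, hvv, hf⟩
              · have : m = k := by omega
                subst this
                exact absurd hvv.symm hv
      exact twoDiffLoopB_res a tg t (k+1) _ (by omega) hinv' h2'
    · -- complement found: return the pair
      simp only [hg]
      rcases (hinv (x - t) i).mp hg with ⟨m, him, hm, hv, hf⟩
      right
      refine ⟨m, k, hm, hlt, by omega, h2, ?_, ?_⟩
      · intro i' hi' hbad
        exact hf i' hi' (by omega)
      · subst him; rfl
termination_by k => a.length - k

-- If no pair at the difference exists, A's loop returns [].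
lemma twoDiffLoopA_nopair (a : List Int) (tg t : Int)
    (hnp : ∀ j < a.length, ∀ i < j, a.getD i 0 ≠ a.getD j 0 - t) :
    ∀ (fuel i j : Nat), i < j → twoDiffLoopA a tg t fuel i j = [] := by
  intro fuel
  induction fuel with
  | zero => intro i j _; rfl
  | succ fuel ih =>
    intro i j hij
    rw [twoDiffLoopA]
    by_cases hj : (j : Int) ≤ (a.length : Int) - 1
    · rw [if_pos hj]
      rcases lt_trichotomy (a.getD j 0 - a.getD i 0) t with hd | hd | hd
      · rw [if_pos hd]; exact ih i (j+1) (by omega)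
      · exact absurd (by omega : a.getD i 0 = a.getD j 0 - t)
          (hnp j (by omega) i hij)
      · rw [if_neg (by omega : ¬ a.getD j 0 - a.getD i 0 < t), if_pos hd]
        by_cases hcol : i + 1 = j
        · rw [if_pos hcol]; exact ih (i+1) (j+1) (by omega)
        · rw [if_neg hcol]; exact ih (i+1) j (by omega)
    · rw [if_neg hj]

-- sortedness gives monotone getD access
lemma pairwise_mono (a : List Int) (hs : List.Pairwise (· ≤ ·) a) :
    ∀ i j : Nat, i ≤ j → j < a.length → a.getD i 0 ≤ a.getD j 0 := by
  intro i j hij hjl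
  rcases Nat.lt_or_ge i j with h | h
  · rw [List.getD_eq_getElem a 0 (by omega), List.getD_eq_getElem a 0 hjl]
    exact List.pairwise_iff_getElem.mp hs i j (by omega) hjl h
  · have : i = j := by omega
    subst this; exact le_refl _

-- ===== VERDICT (by name: the statement is the Claim_ definition above) =====
theorem two_difference_sorted2_spec : Claim_equal_two_difference_sorted2 := by
  intro array target _hdom hpre
  unfold Spec_two_difference_sorted2 two_difference_sorted2 two_difference_sorted2_alt
  have hB : TDRes array target |target| (twoDiffLoopB array target |target| 0 PySem.Dict.empty) := by
    refine twoDiffLoopB_res array target |target| 0 PySem.Dict.empty (by omega) ?_ ?_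
    · intro v i
      constructor
      · intro h; rw [PySem.Dict.get?_empty] at h; cases h
      · rintro ⟨m, _, hm, _⟩; omega
    · intro j' hj'; omega
  rcases hpre with hs | hnp
  · refine TDRes_unique array target |target| _ _ ?_ hB
    exact twoDiffLoopA_res array target |target| (pairwise_mono array hs)
      (2 * array.length + 2) 0 1 (by omega) (by omega)
      (by intro j' hj' i' hi'; omega)
      (by intro _ i' hi'; omega)
  · rw [twoDiffLoopA_nopair array target |target| hnp _ 0 1 (by omega)]
    rcases hB with ⟨e, _⟩ | ⟨i, j, hij, hjl, heq, _⟩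
    · rw [e]
    · exact absurd heq (hnp j hjl i hij)
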